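-- pv_equiv track=rewrite | github.com/fineman999/Algorithm | Programmers/Level1/split_string.py | solution
-- ===== SOURCE A (Python) =====
-- from collections import deque
--
-- def solution(s):
--     s = deque(list(s))
--     result = 0
--
--     while s:
--         x = s.popleft()
--         x_cnt = 1
--         remain_cnt = 0
--         while s:
--             remain = s.popleft()
--             if x == remain:
--                 x_cnt += 1
--             else:
--                 remain_cnt += 1
--             if remain_cnt == x_cnt:
--                 break
--         if x_cnt > 0 or remain_cnt > 0:
--             result += 1
--     return result
-- ===== SOURCE B (Python) =====
-- def solution(s):
--     result = 0
--     in_segment = False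
--     leader = ''
--     same = 0
--     diff = 0
--     for c in s:
--         if not in_segment:
--             leader, same, diff, in_segment = c, 1, 0, True
--         else:
--             if c == leader:
--                 same += 1
--             else:
--                 diff += 1
--             if same == diff:
--                 result += 1
--                 in_segment = False
--     if in_segment:
--         result += 1
--     return result
-- ===== Notes on version B (the rewrite author's own statement) =====
-- stated objective: simpler
-- what changed: Replaced A's deque with nested popleft while-loops by one flat for-loop over the string keeping (in_segment, leader, same, diff) and a final +1 for a trailing unfinished segment.
import Mathlib
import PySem

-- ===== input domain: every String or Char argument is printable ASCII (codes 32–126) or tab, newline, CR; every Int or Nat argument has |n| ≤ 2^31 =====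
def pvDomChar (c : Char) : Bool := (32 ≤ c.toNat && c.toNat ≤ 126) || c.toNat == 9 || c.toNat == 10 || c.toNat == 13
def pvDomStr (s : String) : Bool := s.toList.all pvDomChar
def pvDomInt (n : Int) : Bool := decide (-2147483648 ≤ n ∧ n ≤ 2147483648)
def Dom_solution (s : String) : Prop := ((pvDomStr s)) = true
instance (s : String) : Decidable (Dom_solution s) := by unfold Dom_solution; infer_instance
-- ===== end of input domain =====

-- B replaces A's deque with nested popleft loops by one flat pass keeping (in_segment, leader, same, diff); objective: simpler (same O(n) cost).

-- ===== PORT A =====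
-- inner while loop of A: consumes characters, returns final (x_cnt, remain_cnt, remaining deque)
def innerA (x : Char) (xc rc : Int) : List Char → Int × Int × List Char
  | [] => (xc, rc, [])
  | r :: t =>
    let xc' := if x = r then xc + 1 else xc
    let rc' := if x = r then rc else rc + 1
    if rc' = xc' then (xc', rc', t) else innerA x xc' rc' t

-- the inner loop only consumes (needed for termination of the outer loop)
theorem innerA_len (t : List Char) : ∀ x xc rc, (innerA x xc rc t).2.2.length ≤ t.length := by
  induction t with
  | nil => intro x xc rc; simp [innerA]
  | cons r t ih =>
    intro x xc rc
    simp only [innerA]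
    split_ifs
    all_goals first
      | exact le_trans (ih _ _ _) (Nat.le_succ _)
      | simp

-- outer while loop of A
def outerA : List Char → Int → Int
  | [], result => result
  | x :: s, result =>
    let p := innerA x 1 0 s
    outerA p.2.2 (if p.1 > 0 ∨ p.2.1 > 0 then result + 1 else result)
termination_by l _ => l.length
decreasing_by
  exact Nat.lt_succ_of_le (innerA_len _ _ _ _)

def solution (s : String) : Int := outerA s.toList 0

-- ===== PORT B =====
-- loop body of B's single for-loop; state = (in_segment, leader, same, diff, result)
def stepB (st : Bool × Char × Int × Int × Int) (c : Char) : Bool × Char × Int × Int × Int :=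
  match st with
  | (false, _, _, _, res) => (true, c, 1, 0, res)
  | (true, leader, same, diff, res) =>
    let same' := if c = leader then same + 1 else same
    let diff' := if c = leader then diff else diff + 1
    if same' = diff' then (false, leader, same', diff', res + 1)
    else (true, leader, same', diff', res)

def solution_alt (s : String) : Int :=
  let st := s.toList.foldl stepB (false, ' ', 0, 0, 0)
  if st.1 then st.2.2.2.2 + 1 else st.2.2.2.2

-- ===== PRECONDITION & SPEC =====
def Spec_solution (s : String) (out : Int) : Prop := out = solution_alt s
instance (s : String) (out : Int) : Decidable (Spec_solution s out) := by unfold Spec_solution; infer_instance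

-- ===== CLAIM (what is proved, stated in full; the proofs are below) =====
def Claim_equal_solution : Prop := ∀ (s : String), Dom_solution s → Spec_solution s (solution s)

-- ===== LEMMAS AND PROOFS =====

-- A's inner counter stays positive
theorem innerA_xc_pos (t : List Char) : ∀ x xc rc, 0 < xc → 0 < (innerA x xc rc t).1 := by
  induction t with
  | nil => intro x xc rc h; simpa [innerA] using h
  | cons r t ih =>
    intro x xc rc h
    simp only [innerA]
    split_ifs
    all_goals first
      | exact ih _ _ _ (by omega)
      | (simp; omega)

-- B's fold over the characters A's inner loop consumes, simulated by innerA
theorem sim_inner (t : List Char) : ∀ (x : Char) (xc rc res : Int), rc < xc →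
    (List.foldl stepB (true, x, xc, rc, res) t =
      (if (innerA x xc rc t).1 = (innerA x xc rc t).2.1
       then List.foldl stepB (false, x, (innerA x xc rc t).1, (innerA x xc rc t).2.1, res + 1)
              (innerA x xc rc t).2.2
       else (true, x, (innerA x xc rc t).1, (innerA x xc rc t).2.1, res)))
    ∧ ((innerA x xc rc t).1 ≠ (innerA x xc rc t).2.1 → (innerA x xc rc t).2.2 = []) := by
  induction t with
  | nil =>
    intro x xc rc res h
    constructor
    · simp only [innerA, List.foldl]
      rw [if_neg (by omega)]
    · simp [innerA]
  | cons r t ih =>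
    intro x xc rc res h
    by_cases hx : x = r
    · -- same character: counts become xc+1, rc; no break possible since rc < xc+1
      have hrx : r = x := hx.symm
      simp only [innerA, List.foldl, stepB, if_pos hx, if_pos hrx]
      rw [if_neg (by omega : ¬ rc = xc + 1), if_neg (by omega : ¬ (xc + 1 : Int) = rc)]
      exact ih x (xc + 1) rc res (by omega)
    · -- different character
      have hrx : ¬ r = x := fun hh => hx hh.symm
      simp only [innerA, List.foldl, stepB, if_neg hx, if_neg hrx]
      by_cases hb : (rc + 1 : Int) = xc
      · rw [if_pos hb, if_pos hb.symm]
        simp [hb.symm]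
      · rw [if_neg hb, if_neg (fun hh => hb hh.symm)]
        exact ih x xc (rc + 1) res (by omega)

-- main simulation: A's outer loop equals B's fold-plus-finalize (leader/same/diff are dead when in_segment is false)
theorem sim_outer : ∀ (n : ℕ) (l : List Char), l.length ≤ n → ∀ (res : Int) (a : Char) (b c : Int),
    outerA l res =
      (let st := List.foldl stepB (false, a, b, c, res) l
       if st.1 then st.2.2.2.2 + 1 else st.2.2.2.2) := by
  intro n
  induction n with
  | zero =>
    intro l hl res a b c
    have : l = [] := List.eq_nil_of_length_eq_zero (Nat.le_zero.mp hl)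
    subst this; simp [outerA]
  | succ n ih =>
    intro l hl res a b c
    match l with
    | [] => simp [outerA]
    | x :: s =>
      have hlen : s.length ≤ n := by simpa using hl
      have hpos : 0 < (innerA x 1 0 s).1 := innerA_xc_pos s x 1 0 (by omega)
      have hsim := sim_inner s x 1 0 res (by omega)
      simp only [outerA, List.foldl, stepB]
      rw [if_pos (Or.inl hpos)]
      rw [hsim.1]
      by_cases hb : (innerA x 1 0 s).1 = (innerA x 1 0 s).2.1
      · rw [if_pos hb]
        exact ih _ (le_trans (innerA_len s x 1 0) hlen) (res + 1) _ _ _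
      · rw [if_neg hb]
        rw [hsim.2 hb]
        simp [outerA]

-- ===== VERDICT (by name: the statement is the Claim_ definition above) =====
theorem solution_spec : Claim_equal_solution := by
  intro s _
  unfold Spec_solution solution solution_alt
  exact sim_outer s.toList.length s.toList le_rfl 0 ' ' 0 0
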